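-- pv_equiv track=rewrite | github.com/eldntr/Riasec72 | app.py | calculate_raw_scores
-- ===== SOURCE A (Python) =====
-- def calculate_raw_scores(questions, user_answers):
--     """
--     Menghitung skor mentah untuk setiap kategori RIASEC (R, I, A, S, E, C).
--     """
--     raw_scores = {
--         'R': 0, 'I': 0, 'A': 0, 'S': 0, 'E': 0, 'C': 0
--     }
--
--     categorized_questions = {
--         'R': [], 'I': [], 'A': [], 'S': [], 'E': [], 'C': []
--     }
--     for q in questions:
--         category_prefix = q['id'][0]
--         if category_prefix in categorized_questions:
--             categorized_questions[category_prefix].append(q)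
--
--     for category, q_list in categorized_questions.items():
--         total_category_score = 0
--         for q in q_list:
--             q_id = q['id']
--             if q_id in user_answers:
--                 answers = user_answers[q_id]
--                 minat_score = answers.get('Minat', 0)
--                 confidence_score = answers.get('Kepercayaan Diri', 0)
--                 frequency_score = answers.get('Frekuensi', 0)
--                 total_category_score += (minat_score + confidence_score + frequency_score)
--         raw_scores[category] = total_category_score
--     return raw_scores
-- ===== SOURCE B (Python) =====
-- def calculate_raw_scores(questions, user_answers):
--     """Single aggregating pass: no intermediate per-category question lists."""
--     raw_scores = {'R': 0, 'I': 0, 'A': 0, 'S': 0, 'E': 0, 'C': 0}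
--     for q in questions:
--         q_id = q['id']
--         prefix = q_id[0]
--         if prefix in raw_scores and q_id in user_answers:
--             answers = user_answers[q_id]
--             raw_scores[prefix] += (answers.get('Minat', 0)
--                                    + answers.get('Kepercayaan Diri', 0)
--                                    + answers.get('Frekuensi', 0))
--     return raw_scores
-- ===== Notes on version B (the rewrite author's own statement) =====
-- stated objective: simpler
-- what changed: Replaces A's two-phase build-a-categorized-index-then-sum-per-category structure with a single aggregating pass that adds each question's three answer scores directly into raw_scores[prefix], maintaining no intermediate per-category question lists.
import Mathlib
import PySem

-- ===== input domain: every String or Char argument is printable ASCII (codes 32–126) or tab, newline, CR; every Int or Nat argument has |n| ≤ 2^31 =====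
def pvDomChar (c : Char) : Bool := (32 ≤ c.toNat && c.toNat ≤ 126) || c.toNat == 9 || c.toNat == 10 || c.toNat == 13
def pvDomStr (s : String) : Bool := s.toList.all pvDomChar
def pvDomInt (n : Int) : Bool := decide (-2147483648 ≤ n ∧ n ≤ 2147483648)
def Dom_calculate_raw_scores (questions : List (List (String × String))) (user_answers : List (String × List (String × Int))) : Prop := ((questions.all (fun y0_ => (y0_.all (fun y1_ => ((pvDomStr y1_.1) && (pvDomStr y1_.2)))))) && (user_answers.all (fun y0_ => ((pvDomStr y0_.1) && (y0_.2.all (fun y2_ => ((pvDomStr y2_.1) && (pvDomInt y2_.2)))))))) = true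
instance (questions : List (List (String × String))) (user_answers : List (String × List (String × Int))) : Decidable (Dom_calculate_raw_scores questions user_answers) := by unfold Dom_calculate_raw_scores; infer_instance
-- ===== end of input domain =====

-- B replaces A's build-categorized-lists-then-sum two-phase structure with a single pass that
-- adds each question's score straight into raw_scores[prefix] (objective: simpler).

-- q['id'] : first-match lookup in the question dict (total form; exact under Pre_, which requires the key)
def pvId (q : List (String × String)) : String :=
  PySem.Dict.getD (PySem.Dict.mk q) "id" ""

-- q['id'][0] as a one-character string (exact under Pre_, which requires q['id'] ≠ "")
def pvPrefixS (q : List (String × String)) : String :=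
  String.ofList ((pvId q).toList.take 1)

-- answers.get('Minat',0) + answers.get('Kepercayaan Diri',0) + answers.get('Frekuensi',0)
def pvScore (ans : List (String × Int)) : Int :=
  PySem.Dict.getD (PySem.Dict.mk ans) "Minat" 0
    + PySem.Dict.getD (PySem.Dict.mk ans) "Kepercayaan Diri" 0
    + PySem.Dict.getD (PySem.Dict.mk ans) "Frekuensi" 0

-- ===== PORT A =====
def calculate_raw_scores (questions : List (List (String × String))) (user_answers : List (String × List (String × Int))) : List (String × Int) :=
  let raw_scores : PySem.Dict String Int :=
    PySem.Dict.ofList [("R", 0), ("I", 0), ("A", 0), ("S", 0), ("E", 0), ("C", 0)]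
  let categorized0 : PySem.Dict String (List (List (String × String))) :=
    PySem.Dict.ofList [("R", []), ("I", []), ("A", []), ("S", []), ("E", []), ("C", [])]
  let categorized := questions.foldl (fun d q =>
    if d.contains (pvPrefixS q) then
      d.modify (pvPrefixS q) [] (fun l => l ++ [q])   -- categorized_questions[prefix].append(q)
    else d) categorized0
  let result := categorized.items.foldl (fun rs p =>
    let total := p.2.foldl (fun t q =>
      match (PySem.Dict.mk user_answers).get? (pvId q) with -- 'if q_id in user_answers:' then lookup
      | some answers => t + pvScore answers
      | none => t) 0
    rs.insert p.1 total) raw_scores                        -- raw_scores[category] = total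
  result.items

-- ===== PORT B =====
def calculate_raw_scores_alt (questions : List (List (String × String))) (user_answers : List (String × List (String × Int))) : List (String × Int) :=
  let raw_scores : PySem.Dict String Int :=
    PySem.Dict.ofList [("R", 0), ("I", 0), ("A", 0), ("S", 0), ("E", 0), ("C", 0)]
  let final := questions.foldl (fun d q =>
    if d.contains (pvPrefixS q) then
      match (PySem.Dict.mk user_answers).get? (pvId q) with
      | some answers => d.modify (pvPrefixS q) 0 (fun v => v + pvScore answers)   -- raw_scores[prefix] += …
      | none => d
    else d) raw_scores
  final.items

-- ===== PRECONDITION & SPEC =====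
-- Pre_: every question dict has an 'id' key with a nonempty value; otherwise the Python A
-- (and B alike) raises KeyError/IndexError at q['id'][0].
def Pre_calculate_raw_scores (questions : List (List (String × String))) (user_answers : List (String × List (String × Int))) : Prop :=
  ∀ q ∈ questions, (PySem.Dict.mk q).contains "id" = true ∧ pvId q ≠ ""
instance (questions : List (List (String × String))) (user_answers : List (String × List (String × Int))) : Decidable (Pre_calculate_raw_scores questions user_answers) := by unfold Pre_calculate_raw_scores; infer_instance

def pvWitness_calculate_raw_scores : (List (List (String × String))) × (List (String × List (String × Int))) :=
  ([[("id", "R1")], [("id", "A2")], [("id", "X9")]],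
   [("R1", [("Minat", 2), ("Frekuensi", 1)]), ("A2", [("Kepercayaan Diri", 3)])])

def Spec_calculate_raw_scores (questions : List (List (String × String))) (user_answers : List (String × List (String × Int))) (out : List (String × Int)) : Prop := out = calculate_raw_scores_alt questions user_answers
instance (questions : List (List (String × String))) (user_answers : List (String × List (String × Int))) (out : List (String × Int)) : Decidable (Spec_calculate_raw_scores questions user_answers out) := by unfold Spec_calculate_raw_scores; infer_instance

-- ===== CLAIM (what is proved, stated in full; the proofs are below) =====
def Claim_equal_calculate_raw_scores : Prop := ∀ (questions : List (List (String × String))) (user_answers : List (String × List (String × Int))), Dom_calculate_raw_scores questions user_answers → Pre_calculate_raw_scores questions user_answers → Spec_calculate_raw_scores questions user_answers (calculate_raw_scores questions user_answers)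

-- ===== LEMMAS AND PROOFS =====

-- score of one question under user_answers (0 when unanswered)
def pvQScore (user_answers : List (String × List (String × Int))) (q : List (String × String)) : Int :=
  match (PySem.Dict.mk user_answers).get? (pvId q) with
  | some answers => pvScore answers
  | none => 0

-- A's grouping loop: at each key it holds, it appends exactly the questions with that prefix
theorem pvA_group
    (l : List (List (String × String))) (d : PySem.Dict String (List (List (String × String))))
    (c : String) (hc : d.contains c = true) :
    (l.foldl (fun d q =>
      if d.contains (pvPrefixS q) then
        d.modify (pvPrefixS q) [] (fun l => l ++ [q])
      else d) d).getD c []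
    = d.getD c [] ++ l.filter (fun q => pvPrefixS q == c) := by
  induction l generalizing d with
  | nil => simp
  | cons q rest ih =>
    simp only [List.foldl_cons, List.filter_cons]
    by_cases hp : d.contains (pvPrefixS q) = true
    · simp only [hp, if_true]
      rw [ih _ (by simp [PySem.Dict.contains_modify, hc])]
      by_cases hqc : pvPrefixS q = c
      · subst hqc
        simp [PySem.Dict.getD_modify_self]
      · simp [PySem.Dict.getD_modify, Ne.symm hqc, beq_iff_eq, hqc]
    · have hqc : pvPrefixS q ≠ c := fun h => hp (h ▸ hc)
      simp only [hp, if_false, Bool.false_eq_true]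
      rw [ih _ hc]
      simp [beq_iff_eq, hqc]

-- A's grouping loop never changes the key list
theorem pvA_group_keys (l : List (List (String × String)))
    (d : PySem.Dict String (List (List (String × String)))) :
    (l.foldl (fun d q =>
      if d.contains (pvPrefixS q) then
        d.modify (pvPrefixS q) [] (fun l => l ++ [q])
      else d) d).keys = d.keys := by
  induction l generalizing d with
  | nil => rfl
  | cons q rest ih =>
    simp only [List.foldl_cons]
    by_cases hp : d.contains (pvPrefixS q) = true
    · simp only [hp, if_true]
      rw [ih]
      simp [PySem.Dict.keys_modify, PySem.Dict.keys_insert_of_contains, hp]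
    · simp [hp, ih]

-- A's inner summing loop is the sum of pvQScore over the list
theorem pvA_inner (ua : List (String × List (String × Int)))
    (ql : List (List (String × String))) (t0 : Int) :
    ql.foldl (fun t q =>
      match (PySem.Dict.mk ua).get? (pvId q) with
      | some answers => t + pvScore answers
      | none => t) t0 = t0 + (ql.map (pvQScore ua)).sum := by
  induction ql generalizing t0 with
  | nil => simp
  | cons q rest ih =>
    simp only [List.foldl_cons, List.map_cons, List.sum_cons]
    cases hget : (PySem.Dict.mk ua).get? (pvId q) with
    | some answers =>
      simp only [hget]
      rw [ih]
      simp [pvQScore, hget]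
      ring
    | none =>
      simp only [hget]
      rw [ih]
      simp [pvQScore, hget]

-- B's loop: at each key it holds, it accumulates exactly the scores of questions with that prefix
theorem pvB_loop (ua : List (String × List (String × Int)))
    (l : List (List (String × String))) (d : PySem.Dict String Int)
    (c : String) (hc : d.contains c = true) :
    (l.foldl (fun d q =>
      if d.contains (pvPrefixS q) then
        match (PySem.Dict.mk ua).get? (pvId q) with
        | some answers => d.modify (pvPrefixS q) 0 (fun v => v + pvScore answers)
        | none => d
      else d) d).getD c 0
    = d.getD c 0 + ((l.filter (fun q => pvPrefixS q == c)).map (pvQScore ua)).sum := by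
  induction l generalizing d with
  | nil => simp
  | cons q rest ih =>
    simp only [List.foldl_cons, List.filter_cons]
    by_cases hp : d.contains (pvPrefixS q) = true
    · simp only [hp, if_true]
      by_cases hqc : pvPrefixS q = c
      · subst hqc
        cases hget : (PySem.Dict.mk ua).get? (pvId q) with
        | some answers =>
          simp only [hget]
          rw [ih _ (by simp [PySem.Dict.contains_modify, hp])]
          simp [PySem.Dict.getD_modify_self, pvQScore, hget]
          ring
        | none =>
          simp only [hget]
          rw [ih _ hc]
          simp [pvQScore, hget]
      · cases hget : (PySem.Dict.mk ua).get? (pvId q) with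
        | some answers =>
          simp only [hget]
          rw [ih _ (by simp [PySem.Dict.contains_modify, hc])]
          simp [PySem.Dict.getD_modify, Ne.symm hqc, beq_iff_eq, hqc]
        | none =>
          simp only [hget]
          rw [ih _ hc]
          simp [beq_iff_eq, hqc]
    · have hqc : pvPrefixS q ≠ c := fun h => hp (h ▸ hc)
      simp only [hp, if_false, Bool.false_eq_true]
      rw [ih _ hc]
      simp [beq_iff_eq, hqc]

-- B's loop never changes the key list
theorem pvB_loop_keys (ua : List (String × List (String × Int)))
    (l : List (List (String × String))) (d : PySem.Dict String Int) :
    (l.foldl (fun d q =>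
      if d.contains (pvPrefixS q) then
        match (PySem.Dict.mk ua).get? (pvId q) with
        | some answers => d.modify (pvPrefixS q) 0 (fun v => v + pvScore answers)
        | none => d
      else d) d).keys = d.keys := by
  induction l generalizing d with
  | nil => rfl
  | cons q rest ih =>
    simp only [List.foldl_cons]
    by_cases hp : d.contains (pvPrefixS q) = true
    · cases hget : (PySem.Dict.mk ua).get? (pvId q) with
      | some answers => simp [hp, ih, PySem.Dict.keys_modify, PySem.Dict.keys_insert_of_contains]
      | none => simp [hp, ih]
    · simp [hp, ih]


-- the six keys pin down a dict's item list
theorem pvItems6 {v : Type} (d : PySem.Dict String v) (dflt : v)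
    (hk : d.keys = ["R", "I", "A", "S", "E", "C"]) :
    d.items = [("R", d.getD "R" dflt), ("I", d.getD "I" dflt), ("A", d.getD "A" dflt),
               ("S", d.getD "S" dflt), ("E", d.getD "E" dflt), ("C", d.getD "C" dflt)] := by
  rw [PySem.Dict.items_eq_map_keys d (by rw [hk]; decide) dflt, hk]
  rfl

-- pvA_group specialised to the empty six-key start dict
theorem pvA_group0 (l : List (List (String × String))) (c : String)
    (hc : (PySem.Dict.ofList
      ([("R", []), ("I", []), ("A", []), ("S", []), ("E", []), ("C", [])] :
        List (String × List (List (String × String))))).contains c = true)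
    (h0 : (PySem.Dict.ofList
      ([("R", []), ("I", []), ("A", []), ("S", []), ("E", []), ("C", [])] :
        List (String × List (List (String × String))))).getD c [] = []) :
    (l.foldl (fun d q =>
      if d.contains (pvPrefixS q) then
        d.modify (pvPrefixS q) [] (fun l => l ++ [q])
      else d) (PySem.Dict.ofList [("R", []), ("I", []), ("A", []), ("S", []), ("E", []), ("C", [])])).getD c []
    = l.filter (fun q => pvPrefixS q == c) := by
  rw [pvA_group l _ c hc, h0, List.nil_append]

-- pvB_loop specialised to the zeroed six-key start dict
theorem pvB_loop0 (ua : List (String × List (String × Int)))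
    (l : List (List (String × String))) (c : String)
    (hc : (PySem.Dict.ofList
      ([("R", 0), ("I", 0), ("A", 0), ("S", 0), ("E", 0), ("C", 0)] :
        List (String × Int))).contains c = true)
    (h0 : (PySem.Dict.ofList
      ([("R", 0), ("I", 0), ("A", 0), ("S", 0), ("E", 0), ("C", 0)] :
        List (String × Int))).getD c 0 = 0) :
    (l.foldl (fun d q =>
      if d.contains (pvPrefixS q) then
        match (PySem.Dict.mk ua).get? (pvId q) with
        | some answers => d.modify (pvPrefixS q) 0 (fun v => v + pvScore answers)
        | none => d
      else d) (PySem.Dict.ofList [("R", 0), ("I", 0), ("A", 0), ("S", 0), ("E", 0), ("C", 0)])).getD c 0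
    = 0 + ((l.filter (fun q => pvPrefixS q == c)).map (pvQScore ua)).sum := by
  rw [pvB_loop ua l _ c hc, h0]

-- six in-place overwrites of the literal raw_scores dict
theorem pvInsert6 (a b c' e f g : Int) :
    ((((((PySem.Dict.ofList
        [("R", (0:Int)), ("I", 0), ("A", 0), ("S", 0), ("E", 0), ("C", 0)]).insert "R" a).insert
        "I" b).insert "A" c').insert "S" e).insert "E" f).insert "C" g
      = PySem.Dict.mk [("R", a), ("I", b), ("A", c'), ("S", e), ("E", f), ("C", g)] := by
  rfl

-- ===== VERDICT (by name: the statement is the Claim_ definition above) =====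
theorem calculate_raw_scores_spec : Claim_equal_calculate_raw_scores := by
  intro questions ua _hdom _hpre
  show calculate_raw_scores questions ua = calculate_raw_scores_alt questions ua
  simp only [calculate_raw_scores, calculate_raw_scores_alt]
  -- A side: the grouped dict has the six keys …
  have hkA : (questions.foldl (fun d q =>
      if d.contains (pvPrefixS q) then
        d.modify (pvPrefixS q) [] (fun l => l ++ [q])
      else d) (PySem.Dict.ofList [("R", []), ("I", []), ("A", []), ("S", []), ("E", []), ("C", [])])).keys
      = ["R", "I", "A", "S", "E", "C"] := by
    rw [pvA_group_keys]; rfl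
  -- B side: so does the score dict
  have hkB : (questions.foldl (fun d q =>
      if d.contains (pvPrefixS q) then
        match (PySem.Dict.mk ua).get? (pvId q) with
        | some answers => d.modify (pvPrefixS q) 0 (fun v => v + pvScore answers)
        | none => d
      else d) (PySem.Dict.ofList [("R", 0), ("I", 0), ("A", 0), ("S", 0), ("E", 0), ("C", 0)])).keys
      = ["R", "I", "A", "S", "E", "C"] := by
    rw [pvB_loop_keys]; rfl
  rw [pvItems6 _ [] hkA, pvItems6 _ 0 hkB]
  rw [pvA_group0 questions "R" (by decide) (by decide), pvA_group0 questions "I" (by decide) (by decide),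
      pvA_group0 questions "A" (by decide) (by decide), pvA_group0 questions "S" (by decide) (by decide),
      pvA_group0 questions "E" (by decide) (by decide), pvA_group0 questions "C" (by decide) (by decide)]
  rw [pvB_loop0 ua questions "R" (by decide) (by decide), pvB_loop0 ua questions "I" (by decide) (by decide),
      pvB_loop0 ua questions "A" (by decide) (by decide), pvB_loop0 ua questions "S" (by decide) (by decide),
      pvB_loop0 ua questions "E" (by decide) (by decide), pvB_loop0 ua questions "C" (by decide) (by decide)]
  simp only [List.foldl_cons, List.foldl_nil]
  simp only [pvA_inner]
  rw [pvInsert6]
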